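-- pv_equiv track=rewrite | github.com/mdzimmerman/advent2023 | day12/day12.py | count
-- ===== SOURCE A (Python) =====
-- def count(candidate):
--     counts = []
--     ingroup = False
--     for c in candidate:
--         if ingroup:
--             if c == "#":
--                 counts[-1] += 1
--             else:
--                 ingroup = False
--         else:
--             if c == "#":
--                 counts.append(1)
--                 ingroup = True
--     return counts
-- ===== SOURCE B (Python) =====
-- def count(candidate):
--     n = len(candidate)
--     starts = [i for i in range(n) if candidate[i] == "#" and (i == 0 or candidate[i - 1] != "#")]
--     ends = [i for i in range(n) if candidate[i] == "#" and (i == n - 1 or candidate[i + 1] != "#")]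
--     return [e - b + 1 for b, e in zip(starts, ends)]
-- ===== Notes on version B (the rewrite author's own statement) =====
-- stated objective: alternative
-- what changed: Replaces A's single-pass ingroup state machine that mutates counts[-1] by edge detection: two index comprehensions collect run-start indices (a '#' with no '#' to its left) and run-end indices (a '#' with no '#' to its right), and the lengths are computed arithmetically as end - start + 1 after zipping.
import Mathlib
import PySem

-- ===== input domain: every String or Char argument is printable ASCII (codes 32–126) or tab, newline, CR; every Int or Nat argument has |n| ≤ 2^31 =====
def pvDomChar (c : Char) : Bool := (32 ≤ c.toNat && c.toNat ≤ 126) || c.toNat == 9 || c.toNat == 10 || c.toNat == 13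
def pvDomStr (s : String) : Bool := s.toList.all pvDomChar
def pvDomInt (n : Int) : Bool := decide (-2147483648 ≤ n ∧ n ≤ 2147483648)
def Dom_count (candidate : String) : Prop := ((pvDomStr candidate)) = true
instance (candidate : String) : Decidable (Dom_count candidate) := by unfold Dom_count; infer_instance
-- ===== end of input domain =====

-- B replaces A's ingroup state machine (which mutates counts[-1]) by edge detection:
-- two index comprehensions collect run-start and run-end indices, which are zipped and
-- subtracted (end - start + 1) to give the run lengths (alternative algorithm, same cost).


-- ===== PORT A =====
-- counts[-1] += 1; only ever reached with counts nonempty (ingroup = true), so the [] case is unreachable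
def incLast : List Int → List Int
  | [] => []
  | [x] => [x + 1]
  | x :: xs => x :: incLast xs

-- the for-loop over candidate, state = (counts, ingroup)
def countAux : List Char → List Int → Bool → List Int
  | [], counts, _ => counts
  | c :: cs, counts, ingroup =>
    if ingroup then
      if c = '#' then countAux cs (incLast counts) true
      else countAux cs counts false
    else
      if c = '#' then countAux cs (counts ++ [1]) true
      else countAux cs counts false

def count (candidate : String) : List Int := countAux candidate.toList [] false

-- ===== PORT B =====
-- Both comprehensions read i-1 / i+1 only behind the short-circuiting `or` of Source B, so the
-- total pyGetD's default ' ' is never the deciding value (the guarded disjunct is already true there).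
def count_alt (candidate : String) : List Int :=
  let s := candidate.toList
  let n : Int := PySem.List.len s
  let starts := (PySem.List.pyRange 0 n 1).filter
    (fun i => PySem.List.pyGetD s i ' ' == '#' && (i == 0 || PySem.List.pyGetD s (i - 1) ' ' != '#'))
  let ends := (PySem.List.pyRange 0 n 1).filter
    (fun i => PySem.List.pyGetD s i ' ' == '#' && (i == n - 1 || PySem.List.pyGetD s (i + 1) ' ' != '#'))
  (starts.zip ends).map (fun p => p.2 - p.1 + 1)

-- ===== PRECONDITION & SPEC =====
def Spec_count (candidate : String) (out : List Int) : Prop := out = count_alt candidate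
instance (candidate : String) (out : List Int) : Decidable (Spec_count candidate out) := by unfold Spec_count; infer_instance

-- ===== CLAIM (what is proved, stated in full; the proofs are below) =====
def Claim_equal_count : Prop := ∀ (candidate : String), Dom_count candidate → Spec_count candidate (count candidate)

-- ===== LEMMAS AND PROOFS =====

-- reference recursion for A: state = none (not in a group) / some n (current '#'-run has length n)
def specRun : Option Int → List Char → List Int
  | none, [] => []
  | some n, [] => [n]
  | none, c :: cs => if c = '#' then specRun (some 1) cs else specRun none cs
  | some n, c :: cs => if c = '#' then specRun (some (n + 1)) cs else n :: specRun none cs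

theorem incLast_append (init : List Int) (n : Int) :
    incLast (init ++ [n]) = init ++ [n + 1] := by
  induction init with
  | nil => simp [incLast]
  | cons x xs ih =>
    cases xs with
    | nil => simp [incLast]
    | cons y ys => simpa [incLast] using ih

theorem countAux_spec (cs : List Char) :
    (∀ counts, countAux cs counts false = counts ++ specRun none cs) ∧
    (∀ init n, countAux cs (init ++ [n]) true = init ++ specRun (some n) cs) := by
  induction cs with
  | nil => simp [countAux, specRun]
  | cons c cs ih =>
    constructor
    · intro counts
      by_cases hc : c = '#'
      · simp [countAux, specRun, hc, ih.2]
      · simp [countAux, specRun, hc, ih.1]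
    · intro init n
      by_cases hc : c = '#'
      · simp [countAux, specRun, hc, incLast_append, ih.2]
      · simpa [countAux, specRun, hc] using ih.1 (init ++ [n])

-- B's start scan: prev = whether the previous character was '#', k = absolute index of the head
def startsF : List Char → Bool → Int → List Int
  | [], _, _ => []
  | c :: cs, prev, k =>
    if c = '#' ∧ prev = false then k :: startsF cs true (k + 1)
    else startsF cs (c == '#') (k + 1)

-- B's end scan (lookahead on the next character), k = absolute index of the head
def endsG : List Char → Int → List Int
  | [], _ => []
  | [c], k => if c = '#' then [k] else []
  | c :: c' :: cs, k => if c = '#' ∧ c' ≠ '#' then k :: endsG (c' :: cs) (k + 1) else endsG (c' :: cs) (k + 1)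

-- Nat-level forms of B's two filter predicates; the start one is generalized by the previous char
def PN (prev : Char) (s : List Char) (i : Nat) : Bool :=
  (s.getD i ' ' == '#') && (if i = 0 then prev != '#' else s.getD (i - 1) ' ' != '#')

def QN (s : List Char) (i : Nat) : Bool :=
  (s.getD i ' ' == '#') && (decide (i = s.length - 1) || s.getD (i + 1) ' ' != '#')

theorem filter_starts_eq (s : List Char) : ∀ (prev : Char) (k : Int),
    ((List.range s.length).filter (PN prev s)).map (fun i : Nat => (i : Int) + k)
      = startsF s (prev == '#') k := by
  induction s with
  | nil => intro prev k; simp [startsF]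
  | cons c cs ih =>
    intro prev k
    have hr : List.range (c :: cs).length = 0 :: (List.range cs.length).map Nat.succ := by
      simp [List.range_succ_eq_map]
    have hshift : ((List.range cs.length).map Nat.succ).filter (PN prev (c :: cs))
        = ((List.range cs.length).filter (PN c cs)).map Nat.succ := by
      rw [List.filter_map]
      congr 1
      apply List.filter_congr
      intro i _
      cases i <;> simp [PN, Nat.succ_eq_add_one]
    have hmm : (((List.range cs.length).filter (PN c cs)).map Nat.succ).map (fun i : Nat => (i : Int) + k)
        = ((List.range cs.length).filter (PN c cs)).map (fun i : Nat => (i : Int) + (k + 1)) := by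
      rw [List.map_map]; apply List.map_congr_left; intro i _
      simp [Nat.succ_eq_add_one]; ring
    rw [hr, List.filter_cons, hshift]
    by_cases h0 : PN prev (c :: cs) 0 = true
    · have hc : c = '#' ∧ (prev == '#') = false := by
        simpa [PN] using h0
      simp only [h0, if_pos]
      rw [List.map_cons, hmm, ih c (k + 1)]
      simp [startsF, hc.1, hc.2]
    · have hc : ¬(c = '#' ∧ (prev == '#') = false) := by
        simp only [PN] at h0
        intro ⟨h1, h2⟩
        apply h0
        simp [h1]
        simpa using h2
      simp only [h0, if_neg, Bool.false_eq_true, not_false_eq_true]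
      rw [hmm, ih c (k + 1)]
      rw [startsF]
      simp only [hc, if_neg, not_false_eq_true]

theorem endsG_cons_nonhash (c : Char) (cs : List Char) (k : Int) (hc : c ≠ '#') :
    endsG (c :: cs) k = endsG cs (k + 1) := by
  cases cs <;> simp [endsG, hc]

theorem filter_ends_eq (s : List Char) : ∀ (k : Int),
    ((List.range s.length).filter (QN s)).map (fun i : Nat => (i : Int) + k) = endsG s k := by
  induction s with
  | nil => intro k; simp [endsG]
  | cons c cs ih =>
    intro k
    have hr : List.range (c :: cs).length = 0 :: (List.range cs.length).map Nat.succ := by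
      simp [List.range_succ_eq_map]
    have hshift : ((List.range cs.length).map Nat.succ).filter (QN (c :: cs))
        = ((List.range cs.length).filter (QN cs)).map Nat.succ := by
      rw [List.filter_map]
      congr 1
      apply List.filter_congr
      intro i hi
      have hilen : i < cs.length := List.mem_range.mp hi
      have : (i + 1 = cs.length) ↔ (i = cs.length - 1) := by omega
      simp [QN, Nat.succ_eq_add_one, this]
    have hmm : (((List.range cs.length).filter (QN cs)).map Nat.succ).map (fun i : Nat => (i : Int) + k)
        = ((List.range cs.length).filter (QN cs)).map (fun i : Nat => (i : Int) + (k + 1)) := by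
      rw [List.map_map]; apply List.map_congr_left; intro i _
      simp [Nat.succ_eq_add_one]; ring
    rw [hr, List.filter_cons, hshift]
    by_cases h0 : QN (c :: cs) 0 = true
    · simp only [h0, if_pos]
      rw [List.map_cons, hmm, ih (k + 1)]
      rcases cs with _ | ⟨c', cs'⟩
      · have hc : c = '#' := by simpa [QN] using h0
        simp [endsG, hc]
      · have hc : c = '#' ∧ c' ≠ '#' := by
          simpa [QN] using h0
        simp [endsG, hc.1, hc.2]
    · simp only [h0, if_neg, Bool.false_eq_true, not_false_eq_true]
      rw [hmm, ih (k + 1)]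
      rcases cs with _ | ⟨c', cs'⟩
      · have hc : c ≠ '#' := by
          intro h; apply h0; simp [QN, h]
        simp [endsG, hc]
      · have hc : ¬(c = '#' ∧ c' ≠ '#') := by
          intro ⟨h1, h2⟩; apply h0; simp [QN, h1, h2]
        simp only [endsG, hc, if_neg, not_false_eq_true]

-- the core invariant: pairing the start/end scans and taking e - b + 1 computes A's run lengths
theorem main_zip (s : List Char) : ∀ (k b : Int),
    (((startsF s false k).zip (endsG s k)).map (fun p : Int × Int => p.2 - p.1 + 1) = specRun none s)
    ∧ (((b :: startsF s true (k + 1)).zip (endsG ('#' :: s) k)).map (fun p : Int × Int => p.2 - p.1 + 1)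
        = specRun (some (k - b + 1)) s) := by
  induction s with
  | nil =>
    intro k b
    constructor
    · simp [startsF, endsG, specRun]
    · simp [startsF, endsG, specRun]
  | cons c cs ih =>
    intro k b
    constructor
    · by_cases hc : c = '#'
      · have hmb := (ih k k).2
        have he : k - k + 1 = (1 : Int) := by ring
        rw [he] at hmb
        simpa [startsF, specRun, hc] using hmb
      · have hma := (ih (k + 1) b).1
        have hb : (c == '#') = false := by simpa using hc
        rw [endsG_cons_nonhash c cs k hc]
        simpa [startsF, specRun, hc, hb] using hma
    · by_cases hc : c = '#'
      · have hmb := (ih (k + 1) b).2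
        have he : k + 1 - b + 1 = k - b + 1 + 1 := by ring
        rw [he] at hmb
        simpa [startsF, endsG, specRun, hc] using hmb
      · have hma := (ih (k + 1 + 1) b).1
        have hb : (c == '#') = false := by simpa using hc
        have hend : endsG ('#' :: c :: cs) k = k :: endsG (c :: cs) (k + 1) := by
          simp [endsG, hc]
        have hst : startsF (c :: cs) true (k + 1) = startsF cs false (k + 1 + 1) := by
          rw [startsF]
          simp [hc, hb]
        rw [hend, endsG_cons_nonhash c cs (k + 1) hc, hst]
        rw [List.zip_cons_cons, List.map_cons, hma]
        simp [specRun, hc]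

-- B's start predicate over pyRange/pyGetD agrees pointwise with PN ' '
theorem predS_eq (s : List Char) (i : Nat) :
    ((fun i => PySem.List.pyGetD s i ' ' == '#' && (i == 0 || PySem.List.pyGetD s (i - 1) ' ' != '#'))
        ∘ (fun k : Nat => (k : Int))) i = PN ' ' s i := by
  cases i with
  | zero => simp [PN, PySem.List.pyGetD_zero]
  | succ j =>
    have hsub : ((j + 1 : Nat) : Int) - 1 = (j : Int) := by push_cast; ring
    have hne : (((j + 1 : Nat) : Int) == 0) = false := by
      rw [beq_eq_false_iff_ne]; omega
    simp only [Function.comp_apply]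
    rw [PySem.List.pyGetD_natCast, hsub, PySem.List.pyGetD_natCast, hne]
    simp [PN]

-- B's end predicate over pyRange/pyGetD agrees pointwise with QN (needs i < len for the boundary test)
theorem predE_eq (s : List Char) (i : Nat) (hi : i < s.length) :
    ((fun i => PySem.List.pyGetD s i ' ' == '#' && (i == (s.length : Int) - 1 || PySem.List.pyGetD s (i + 1) ' ' != '#'))
        ∘ (fun k : Nat => (k : Int))) i = QN s i := by
  have hadd : ((i : Int)) + 1 = ((i + 1 : Nat) : Int) := by push_cast; ring
  have hbb : (((i : Int)) == ((s.length : Int) - 1)) = (decide (i = s.length - 1)) := by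
    by_cases h : i = s.length - 1
    · have hz : (i : Int) = (s.length : Int) - 1 := by omega
      simp [h, hz]
      omega
    · have hz : (i : Int) ≠ (s.length : Int) - 1 := by omega
      simp [h, hz]
  simp only [Function.comp_apply]
  rw [PySem.List.pyGetD_natCast, hadd, PySem.List.pyGetD_natCast, hbb]
  simp [QN]

theorem bridge_starts (s : List Char) :
    ((PySem.List.pyRange 0 (s.length : Int) 1).filter
      (fun i => PySem.List.pyGetD s i ' ' == '#' && (i == 0 || PySem.List.pyGetD s (i - 1) ' ' != '#')))
      = startsF s false 0 := by
  rw [PySem.List.pyRange_zero_natCast, List.filter_map]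
  rw [List.filter_congr (fun i _ => predS_eq s i)]
  have hmap : ((List.range s.length).filter (PN ' ' s)).map (fun k : Nat => (k : Int))
      = ((List.range s.length).filter (PN ' ' s)).map (fun i : Nat => (i : Int) + 0) := by
    simp
  rw [hmap, filter_starts_eq]
  have : (' ' == '#') = false := by decide
  rw [this]

theorem bridge_ends (s : List Char) :
    ((PySem.List.pyRange 0 (s.length : Int) 1).filter
      (fun i => PySem.List.pyGetD s i ' ' == '#' && (i == (s.length : Int) - 1 || PySem.List.pyGetD s (i + 1) ' ' != '#')))
      = endsG s 0 := by
  rw [PySem.List.pyRange_zero_natCast, List.filter_map]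
  rw [List.filter_congr (fun i hi => predE_eq s i (List.mem_range.mp hi))]
  have hmap : ((List.range s.length).filter (QN s)).map (fun k : Nat => (k : Int))
      = ((List.range s.length).filter (QN s)).map (fun i : Nat => (i : Int) + 0) := by
    simp
  rw [hmap, filter_ends_eq]

-- ===== VERDICT (by name: the statement is the Claim_ definition above) =====
theorem count_spec : Claim_equal_count := by
  intro candidate _
  unfold Spec_count count
  rw [(countAux_spec candidate.toList).1 []]
  simp only [List.nil_append, count_alt, PySem.List.len_eq]
  rw [bridge_starts, bridge_ends]
  exact ((main_zip candidate.toList 0 0).1).symm
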